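-- pv_equiv track=rewrite | github.com/swasthiknrao/Kavach-AI | backend/models/ai_modules/multimodal_analyzer.py | extract_interaction_features
-- ===== SOURCE A (Python) =====
-- from collections import Counter
--
-- def extract_interaction_features(interactions):
--     """Extract user interaction patterns"""
--     if not interactions:
--         return [0] * 32
--
--     features = []
--
--     # Count different types of interactions
--     interaction_types = Counter(i.get('type') for i in interactions)
--
--     features.extend([
--         interaction_types.get('click', 0),
--         interaction_types.get('scroll', 0),
--         interaction_types.get('keypress', 0),
--         interaction_types.get('mousemove', 0)
--     ])
--
--     # Pad to fixed size
--     features.extend([0] * (32 - len(features)))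
--     return features
-- ===== SOURCE B (Python) =====
-- def extract_interaction_features(interactions):
--     """Extract user interaction patterns"""
--     order = ('click', 'scroll', 'keypress', 'mousemove')
--     # sort the relevant type strings, then count maximal runs of equal values
--     ts = sorted(t for t in (i.get('type') for i in interactions) if t in order)
--     features = [0, 0, 0, 0]
--     while ts:
--         v = ts[0]
--         n = 1
--         while n < len(ts) and ts[n] == v:
--             n += 1
--         features[order.index(v)] += n
--         del ts[:n]
--     return features + [0] * 28
-- ===== Notes on version B (the rewrite author's own statement) =====
-- stated objective: alternative
-- what changed: Replaces the single-pass Counter hash tally (and its empty-input early return) with a sort-then-group algorithm: the relevant type strings are filtered and sorted, then one scan over the sorted list counts maximal runs of equal values and adds each run length to its slot.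
import Mathlib
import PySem

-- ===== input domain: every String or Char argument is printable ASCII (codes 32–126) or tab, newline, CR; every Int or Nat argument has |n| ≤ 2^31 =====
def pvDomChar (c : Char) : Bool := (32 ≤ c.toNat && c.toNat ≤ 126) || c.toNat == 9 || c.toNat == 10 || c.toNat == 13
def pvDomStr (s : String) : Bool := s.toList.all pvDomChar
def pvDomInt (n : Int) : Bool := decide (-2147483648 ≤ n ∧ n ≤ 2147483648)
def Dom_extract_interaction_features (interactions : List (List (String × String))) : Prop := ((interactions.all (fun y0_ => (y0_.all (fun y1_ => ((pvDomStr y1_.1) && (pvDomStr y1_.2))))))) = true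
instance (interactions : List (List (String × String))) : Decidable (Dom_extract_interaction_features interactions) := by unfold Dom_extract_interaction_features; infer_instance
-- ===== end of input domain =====

-- B replaces A's Counter frequency table (and its empty-input early return) with a
-- sort-then-group-runs algorithm: sort the relevant type strings, then count maximal
-- runs of equal values; same return value, proved equivalent (objective: alternative).

-- ===== PORT A =====
def extract_interaction_features (interactions : List (List (String × String))) : List Int :=
  if interactions = [] then List.replicate 32 0
  else
    let interaction_types := PySem.Dict.counter (interactions.map (fun i => (PySem.Dict.ofList i).get? "type"))
    let features : List Int :=
      [interaction_types.getD (some "click") 0,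
       interaction_types.getD (some "scroll") 0,
       interaction_types.getD (some "keypress") 0,
       interaction_types.getD (some "mousemove") 0]
    features ++ List.replicate (32 - features.length) 0

-- ===== PORT B =====
def pvOrder : List String := ["click", "scroll", "keypress", "mousemove"]

-- sorted(t for t in (i.get('type') for i in interactions) if t in order)
-- ('if t in order' keeps t : Option String only when it is some s with s ∈ order,
--  so the kept values are returned as the String s; None is never in order)
def pvTs (interactions : List (List (String × String))) : List String :=
  PySem.List.sorted
    ((interactions.map (fun i => (PySem.Dict.ofList i).get? "type")).filterMap
      (fun t => if t ∈ pvOrder.map some then t else none))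
    (fun x => x) false

-- features[order.index(v)] += n  (order.index(v) always succeeds on the values the loop sees)
def pvBump (features : List Int) (idx : Option Nat) (n : Int) : List Int :=
  match idx with
  | some k => PySem.List.pySetD features (k : Int) (PySem.List.pyGetD features (k : Int) 0 + n)
  | none => features

-- the while loop: v = ts[0]; inner while counts the run of v's; del ts[:n]
def pvRunLoop (features : List Int) (ts : List String) : List Int :=
  match ts with
  | [] => features
  | v :: rest =>
    let run := rest.takeWhile (fun x => x == v)
    pvRunLoop (pvBump features (PySem.List.index? pvOrder v) (1 + (run.length : Int)))
      (rest.dropWhile (fun x => x == v))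
termination_by ts.length
decreasing_by
  simp only [List.length_cons]
  exact Nat.lt_succ_of_le (List.length_dropWhile_le _ _)

def extract_interaction_features_alt (interactions : List (List (String × String))) : List Int :=
  pvRunLoop [0, 0, 0, 0] (pvTs interactions) ++ List.replicate 28 0

-- ===== PRECONDITION & SPEC =====
def Spec_extract_interaction_features (interactions : List (List (String × String))) (out : List Int) : Prop := out = extract_interaction_features_alt interactions
instance (interactions : List (List (String × String))) (out : List Int) : Decidable (Spec_extract_interaction_features interactions out) := by unfold Spec_extract_interaction_features; infer_instance

-- ===== CLAIM (what is proved, stated in full; the proofs are below) =====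
def Claim_equal_extract_interaction_features : Prop := ∀ (interactions : List (List (String × String))), Dom_extract_interaction_features interactions → Spec_extract_interaction_features interactions (extract_interaction_features interactions)

-- ===== LEMMAS AND PROOFS =====

-- counting across one maximal run: the head's value gains the whole run
theorem count_run_self (v : String) (rest : List String) :
    ((v :: rest).count v : Int)
      = (1 + ((rest.takeWhile (fun x => x == v)).length : Int)) + ((rest.dropWhile (fun x => x == v)).count v : Int) := by
  have hsplit : rest = rest.takeWhile (fun x => x == v) ++ rest.dropWhile (fun x => x == v) :=
    (List.takeWhile_append_dropWhile).symm
  have htake : (rest.takeWhile (fun x => x == v)).count v = (rest.takeWhile (fun x => x == v)).length := by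
    rw [List.count_eq_length]
    intro b hb
    have hb' := List.mem_takeWhile_imp hb
    simp only [beq_iff_eq] at hb'
    exact hb'.symm
  have h2 : rest.count v
      = (rest.takeWhile (fun x => x == v)).length + (rest.dropWhile (fun x => x == v)).count v := by
    conv_lhs => rw [hsplit]
    rw [List.count_append, htake]
  rw [List.count_cons_self, h2]
  push_cast
  ring

-- other values are untouched by the run
theorem count_run_other (v w : String) (hw : w ≠ v) (rest : List String) :
    (v :: rest).count w = (rest.dropWhile (fun x => x == v)).count w := by
  have hsplit : rest = rest.takeWhile (fun x => x == v) ++ rest.dropWhile (fun x => x == v) :=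
    (List.takeWhile_append_dropWhile).symm
  have htake : (rest.takeWhile (fun x => x == v)).count w = 0 := by
    rw [List.count_eq_zero]
    intro hmem
    have hm' := List.mem_takeWhile_imp hmem
    simp only [beq_iff_eq] at hm'
    exact hw hm'
  conv_lhs => rw [List.count_cons_of_ne (Ne.symm hw), hsplit]
  rw [List.count_append, htake]
  omega

-- the four slot updates, computed
theorem pvBump_0 (x y z w u : Int) : pvBump [x, y, z, w] (some 0) u = [x + u, y, z, w] := rfl
theorem pvBump_1 (x y z w u : Int) : pvBump [x, y, z, w] (some 1) u = [x, y + u, z, w] := rfl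
theorem pvBump_2 (x y z w u : Int) : pvBump [x, y, z, w] (some 2) u = [x, y, z + u, w] := rfl
theorem pvBump_3 (x y z w u : Int) : pvBump [x, y, z, w] (some 3) u = [x, y, z, w + u] := rfl

-- the run loop tallies each element of ts once into the slot of its value
theorem pvRunLoop_spec : ∀ (n : Nat) (ts : List String), ts.length ≤ n → (∀ v ∈ ts, v ∈ pvOrder) →
    ∀ a b c d : Int,
    pvRunLoop [a, b, c, d] ts =
      [a + ts.count "click", b + ts.count "scroll", c + ts.count "keypress", d + ts.count "mousemove"] := by
  intro n
  induction n with
  | zero =>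
    intro ts hlen _ a b c d
    have : ts = [] := List.eq_nil_of_length_eq_zero (Nat.le_zero.mp hlen)
    subst this
    simp [pvRunLoop]
  | succ n ih =>
    intro ts hlen hmem a b c d
    match ts with
    | [] => simp [pvRunLoop]
    | v :: rest =>
      have hdlen : (rest.dropWhile (fun x => x == v)).length ≤ n := by
        have := List.length_dropWhile_le (l := rest) (p := fun x => x == v)
        simp only [List.length_cons] at hlen
        omega
      have hdmem : ∀ w ∈ rest.dropWhile (fun x => x == v), w ∈ pvOrder := by
        intro w hw
        exact hmem w (List.mem_cons_of_mem _ ((List.dropWhile_sublist _).subset hw))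
      have hv : v ∈ pvOrder := hmem v (List.mem_cons_self ..)
      rw [pvRunLoop]
      have hvcases : v = "click" ∨ v = "scroll" ∨ v = "keypress" ∨ v = "mousemove" := by
        simpa [pvOrder] using hv
      rcases hvcases with h | h | h | h <;> subst h
      · rw [show PySem.List.index? pvOrder "click" = some 0 from by decide, pvBump_0,
          ih _ hdlen hdmem, count_run_self,
          count_run_other "click" "scroll" (by decide),
          count_run_other "click" "keypress" (by decide),
          count_run_other "click" "mousemove" (by decide)]
        simp [add_assoc]
      · rw [show PySem.List.index? pvOrder "scroll" = some 1 from by decide, pvBump_1,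
          ih _ hdlen hdmem, count_run_self,
          count_run_other "scroll" "click" (by decide),
          count_run_other "scroll" "keypress" (by decide),
          count_run_other "scroll" "mousemove" (by decide)]
        simp [add_assoc]
      · rw [show PySem.List.index? pvOrder "keypress" = some 2 from by decide, pvBump_2,
          ih _ hdlen hdmem, count_run_self,
          count_run_other "keypress" "click" (by decide),
          count_run_other "keypress" "scroll" (by decide),
          count_run_other "keypress" "mousemove" (by decide)]
        simp [add_assoc]
      · rw [show PySem.List.index? pvOrder "mousemove" = some 3 from by decide, pvBump_3,
          ih _ hdlen hdmem, count_run_self,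
          count_run_other "mousemove" "click" (by decide),
          count_run_other "mousemove" "scroll" (by decide),
          count_run_other "mousemove" "keypress" (by decide)]
        simp [add_assoc]

-- every value of pvTs is one of the four counted strings
theorem pvTs_mem (interactions : List (List (String × String))) :
    ∀ v ∈ pvTs interactions, v ∈ pvOrder := by
  intro v hv
  rw [pvTs, PySem.List.mem_sorted] at hv
  obtain ⟨t, _, ht⟩ := List.mem_filterMap.mp hv
  by_cases hc : t ∈ pvOrder.map some
  · rw [if_pos hc] at ht
    subst ht
    simpa using hc
  · rw [if_neg hc] at ht
    exact absurd ht (by simp)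

-- the filter keeps exactly the occurrences of each counted value
theorem count_pvTs (interactions : List (List (String × String))) (s : String) (hs : s ∈ pvOrder) :
    (pvTs interactions).count s
      = (interactions.map (fun i => (PySem.Dict.ofList i).get? "type")).count (some s) := by
  rw [pvTs, (PySem.List.sorted_perm _ _ _).count_eq]
  generalize interactions.map (fun i => (PySem.Dict.ofList i).get? "type") = l
  induction l with
  | nil => rfl
  | cons t l ihl =>
    by_cases ht : t = some s
    · subst ht
      have hf : (if (some s) ∈ pvOrder.map some then some s else none) = some s :=
        if_pos (List.mem_map.mpr ⟨s, hs, rfl⟩)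
      simp only [List.filterMap_cons, hf]
      rw [List.count_cons_self, List.count_cons_self, ihl]
    · rcases hc : (if t ∈ pvOrder.map some then t else none) with _ | u
      · simp only [List.filterMap_cons, hc]
        rw [List.count_cons_of_ne ht, ihl]
      · have htu : t = some u := by
          by_cases hmem : t ∈ pvOrder.map some
          · rw [if_pos hmem] at hc; exact hc
          · rw [if_neg hmem] at hc; cases hc
        have hus : u ≠ s := fun h => ht (by rw [htu, h])
        simp only [List.filterMap_cons, hc]
        rw [List.count_cons_of_ne hus, List.count_cons_of_ne ht, ihl]

-- ===== VERDICT (by name: the statement is the Claim_ definition above) =====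
theorem extract_interaction_features_spec : Claim_equal_extract_interaction_features := by
  intro interactions _
  unfold Spec_extract_interaction_features extract_interaction_features extract_interaction_features_alt
  by_cases h : interactions = []
  · subst h
    have : pvTs [] = [] := rfl
    rw [this]
    simp [pvRunLoop]
  · rw [if_neg h,
      pvRunLoop_spec (pvTs interactions).length (pvTs interactions) le_rfl (pvTs_mem interactions),
      count_pvTs _ "click" (by decide), count_pvTs _ "scroll" (by decide),
      count_pvTs _ "keypress" (by decide), count_pvTs _ "mousemove" (by decide)]
    simp [PySem.Dict.getD_counter]
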